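-- pv_equiv track=rewrite | github.com/joeording3/enhanced-video-downloader-2024 | scripts/generate-ignore-files.py | generate_gitignore
-- ===== SOURCE A (Python) =====
-- def generate_gitignore(patterns: list[str]) -> str:
--     """Generate .gitignore content."""
--     lines = [
--         "# Generated from config/ignore-patterns.json - DO NOT EDIT DIRECTLY",
--         "# Run: python scripts/generate-ignore-files.py to update",
--         "",
--     ]
--
--     # Group patterns by type for better organization
--     python_patterns = [p for p in patterns if "py" in p or "__pycache__" in p or ".py" in p]
--     node_patterns = [p for p in patterns if "node" in p or "npm" in p or "yarn" in p]
--     build_patterns = [p for p in patterns if "build" in p or "dist" in p or "cache" in p]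
--     system_patterns = [
--         p for p in patterns if p.startswith(".") and not any(x in p for x in ["py", "node", "build", "dist"])
--     ]
--     other_patterns = [
--         p for p in patterns if p not in python_patterns + node_patterns + build_patterns + system_patterns
--     ]
--
--     if python_patterns:
--         lines.extend(["# Python", "", *python_patterns, ""])
--
--     if node_patterns:
--         lines.extend(["# Node.js", "", *node_patterns, ""])
--
--     if build_patterns:
--         lines.extend(["# Build artifacts", "", *build_patterns, ""])
--
--     if system_patterns:
--         lines.extend(["# System files", "", *system_patterns, ""])
--
--     if other_patterns:
--         lines.extend(["# Other", "", *other_patterns, ""])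
--
--     return "\n".join(lines)
-- ===== SOURCE B (Python) =====
-- def _is_python(p: str) -> bool:
--     return "py" in p or "__pycache__" in p or ".py" in p
--
--
-- def _is_node(p: str) -> bool:
--     return "node" in p or "npm" in p or "yarn" in p
--
--
-- def _is_build(p: str) -> bool:
--     return "build" in p or "dist" in p or "cache" in p
--
--
-- def _is_system(p: str) -> bool:
--     return p.startswith(".") and not any(x in p for x in ["py", "node", "build", "dist"])
--
--
-- def generate_gitignore(patterns: list[str]) -> str:
--     """Generate .gitignore content (single-pass classification)."""
--     lines = [
--         "# Generated from config/ignore-patterns.json - DO NOT EDIT DIRECTLY",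
--         "# Run: python scripts/generate-ignore-files.py to update",
--         "",
--     ]
--     python, node, build, system, other = [], [], [], [], []
--     for p in patterns:
--         if _is_python(p):
--             python.append(p)
--         if _is_node(p):
--             node.append(p)
--         if _is_build(p):
--             build.append(p)
--         if _is_system(p):
--             system.append(p)
--         if not (_is_python(p) or _is_node(p) or _is_build(p) or _is_system(p)):
--             other.append(p)
--     for header, group in [
--         ("# Python", python),
--         ("# Node.js", node),
--         ("# Build artifacts", build),
--         ("# System files", system),
--         ("# Other", other),
--     ]:
--         if group:
--             lines.extend([header, "", *group, ""])
--     return "\n".join(lines)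
-- ===== Notes on version B (the rewrite author's own statement) =====
-- stated objective: alternative
-- what changed: Replaces A's five independent comprehensions over patterns (the last re-scanning the concatenation of the first four per element) with a single pass that appends each pattern to every matching bucket and tracks a matched flag for 'other', and replaces the five copy-pasted section blocks with one loop over (header, group) pairs.
import Mathlib
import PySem

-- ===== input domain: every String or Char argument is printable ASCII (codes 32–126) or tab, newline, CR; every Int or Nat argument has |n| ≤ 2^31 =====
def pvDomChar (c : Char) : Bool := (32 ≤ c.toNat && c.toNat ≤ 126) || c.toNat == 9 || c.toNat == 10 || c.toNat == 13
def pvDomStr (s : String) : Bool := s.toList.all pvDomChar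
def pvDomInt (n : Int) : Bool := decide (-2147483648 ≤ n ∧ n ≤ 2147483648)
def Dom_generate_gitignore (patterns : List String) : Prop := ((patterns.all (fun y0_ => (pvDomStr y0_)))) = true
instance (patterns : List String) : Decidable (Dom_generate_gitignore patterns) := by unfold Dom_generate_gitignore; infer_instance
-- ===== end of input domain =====

-- B replaces A's five separate comprehensions (the last re-scanning the concatenation of the first four) with one pass over patterns into five buckets and one loop over (header, group) section pairs; objective: alternative decomposition, no speed claim.
-- ===== PORT A =====
def generate_gitignore (patterns : List String) : String :=
  let lines : List String := [
    "# Generated from config/ignore-patterns.json - DO NOT EDIT DIRECTLY",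
    "# Run: python scripts/generate-ignore-files.py to update",
    ""]
  let python_patterns := patterns.filter (fun p =>
    PySem.Str.isIn "py" p || PySem.Str.isIn "__pycache__" p || PySem.Str.isIn ".py" p)
  let node_patterns := patterns.filter (fun p =>
    PySem.Str.isIn "node" p || PySem.Str.isIn "npm" p || PySem.Str.isIn "yarn" p)
  let build_patterns := patterns.filter (fun p =>
    PySem.Str.isIn "build" p || PySem.Str.isIn "dist" p || PySem.Str.isIn "cache" p)
  let system_patterns := patterns.filter (fun p =>
    PySem.Str.startswith p "." &&
      !(["py", "node", "build", "dist"].any (fun x => PySem.Str.isIn x p)))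
  let other_patterns := patterns.filter (fun p =>
    !((python_patterns ++ node_patterns ++ build_patterns ++ system_patterns).contains p))
  let lines := if python_patterns ≠ [] then lines ++ ["# Python", ""] ++ python_patterns ++ [""] else lines
  let lines := if node_patterns ≠ [] then lines ++ ["# Node.js", ""] ++ node_patterns ++ [""] else lines
  let lines := if build_patterns ≠ [] then lines ++ ["# Build artifacts", ""] ++ build_patterns ++ [""] else lines
  let lines := if system_patterns ≠ [] then lines ++ ["# System files", ""] ++ system_patterns ++ [""] else lines
  let lines := if other_patterns ≠ [] then lines ++ ["# Other", ""] ++ other_patterns ++ [""] else lines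
  PySem.Str.join "\n" lines

-- ===== PORT B =====
-- B: named predicates + a single pass over patterns filling five buckets,
-- then one loop over (header, group) pairs; agrees with A's five comprehensions.
def ggC1 (p : String) : Bool :=
  PySem.Str.isIn "py" p || PySem.Str.isIn "__pycache__" p || PySem.Str.isIn ".py" p
def ggC2 (p : String) : Bool :=
  PySem.Str.isIn "node" p || PySem.Str.isIn "npm" p || PySem.Str.isIn "yarn" p
def ggC3 (p : String) : Bool :=
  PySem.Str.isIn "build" p || PySem.Str.isIn "dist" p || PySem.Str.isIn "cache" p
def ggC4 (p : String) : Bool :=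
  PySem.Str.startswith p "." &&
    !(["py", "node", "build", "dist"].any (fun x => PySem.Str.isIn x p))

def ggStep (acc : List String × List String × List String × List String × List String)
    (p : String) : List String × List String × List String × List String × List String :=
  let (py, nd, bd, sy, ot) := acc
  ((if ggC1 p then py ++ [p] else py),
   (if ggC2 p then nd ++ [p] else nd),
   (if ggC3 p then bd ++ [p] else bd),
   (if ggC4 p then sy ++ [p] else sy),
   (if !(ggC1 p || ggC2 p || ggC3 p || ggC4 p) then ot ++ [p] else ot))

def generate_gitignore_alt (patterns : List String) : String :=
  let header : List String := [
    "# Generated from config/ignore-patterns.json - DO NOT EDIT DIRECTLY",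
    "# Run: python scripts/generate-ignore-files.py to update",
    ""]
  let (py, nd, bd, sy, ot) := patterns.foldl ggStep ([], [], [], [], [])
  let lines := [("# Python", py), ("# Node.js", nd), ("# Build artifacts", bd),
      ("# System files", sy), ("# Other", ot)].foldl
    (fun ls hg => if hg.2 ≠ [] then ls ++ [hg.1, ""] ++ hg.2 ++ [""] else ls) header
  PySem.Str.join "\n" lines

-- ===== PRECONDITION & SPEC =====
def Spec_generate_gitignore (patterns : List String) (out : String) : Prop := out = generate_gitignore_alt patterns
instance (patterns : List String) (out : String) : Decidable (Spec_generate_gitignore patterns out) := by unfold Spec_generate_gitignore; infer_instance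

-- ===== CLAIM (what is proved, stated in full; the proofs are below) =====
def Claim_equal_generate_gitignore : Prop := ∀ (patterns : List String), Dom_generate_gitignore patterns → Spec_generate_gitignore patterns (generate_gitignore patterns)

-- ===== LEMMAS AND PROOFS =====

def ggC5 (p : String) : Bool := !(ggC1 p || ggC2 p || ggC3 p || ggC4 p)

-- B's single pass produces exactly A's five filters (appended to the accumulators).
theorem gg_fold_eq (l : List String) : ∀ py nd bd sy ot : List String,
    l.foldl ggStep (py, nd, bd, sy, ot) =
      (py ++ l.filter ggC1, nd ++ l.filter ggC2, bd ++ l.filter ggC3,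
       sy ++ l.filter ggC4, ot ++ l.filter ggC5) := by
  induction l with
  | nil => simp
  | cons x l ih =>
    intro py nd bd sy ot
    simp only [List.foldl_cons, ggStep, List.filter_cons, ggC5]
    rw [ih]
    by_cases h1 : ggC1 x = true <;> by_cases h2 : ggC2 x = true <;>
      by_cases h3 : ggC3 x = true <;> by_cases h4 : ggC4 x = true <;>
        simp [h1, h2, h3, h4]

-- For a member of l, membership in a filtered copy of l is the predicate itself.
theorem gg_contains_filter (l : List String) (p : String) (hp : p ∈ l) (c : String → Bool) :
    (l.filter c).contains p = c p := by
  cases hc : c p <;> simp_all [List.mem_filter]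

-- A's "other" comprehension (value membership in the concatenation) equals the
-- no-condition-matched predicate ggC5.
theorem gg_other_eq (l : List String) :
    l.filter (fun p =>
        !((l.filter ggC1 ++ l.filter ggC2 ++ l.filter ggC3 ++ l.filter ggC4).contains p)) =
      l.filter ggC5 := by
  apply List.filter_congr
  intro p hp
  simp only [List.contains_append, gg_contains_filter l p hp, ggC5]

-- ===== VERDICT (by name: the statement is the Claim_ definition above) =====
theorem generate_gitignore_spec : Claim_equal_generate_gitignore := by
  intro patterns _
  simp only [Spec_generate_gitignore, generate_gitignore, generate_gitignore_alt]
  rw [gg_fold_eq]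
  rw [show (fun p => PySem.Str.isIn "py" p || PySem.Str.isIn "__pycache__" p ||
        PySem.Str.isIn ".py" p) = ggC1 from rfl,
      show (fun p => PySem.Str.isIn "node" p || PySem.Str.isIn "npm" p ||
        PySem.Str.isIn "yarn" p) = ggC2 from rfl,
      show (fun p => PySem.Str.isIn "build" p || PySem.Str.isIn "dist" p ||
        PySem.Str.isIn "cache" p) = ggC3 from rfl,
      show (fun p => PySem.Str.startswith p "." &&
        !(["py", "node", "build", "dist"].any (fun x => PySem.Str.isIn x p))) = ggC4 from rfl]
  rw [gg_other_eq]
  simp [List.foldl]
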